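-- pv_equiv track=rewrite | github.com/TheArcus02/Python-Assignments | sequence_transform.py | get_string_info
-- ===== SOURCE A (Python) =====
-- def get_string_info(string: str, operators: list):
--     longest_str = len(string)
--     longest_str_val = string
--     new_str = string
--     for op in operators:
--         op_slice = op.split(';')
--         first_idx = int(op_slice[0])
--         sec_idx = int(op_slice[1])
--         op_str = str(op_slice[2])
--         new_str = new_str[:min(first_idx, sec_idx)] + op_str + new_str[max(first_idx, sec_idx)+1:]
--
--         if len(new_str) > longest_str:
--             longest_str = len(new_str)
--             longest_str_val = new_str
--
--     return new_str, longest_str_val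
-- ===== SOURCE B (Python) =====
-- def _splice(s, op):
--     p = op.split(';')
--     i, j = int(p[0]), int(p[1])
--     return s[:min(i, j)] + p[2] + s[max(i, j) + 1:]
--
--
-- def get_string_info(string: str, operators: list):
--     # pass 1: compute the final string, remembering only the INDEX (0 = original)
--     # of the first longest intermediate, never storing that string itself
--     cur, best_idx, best_len, k = string, 0, len(string), 0
--     for op in operators:
--         k += 1
--         cur = _splice(cur, op)
--         if len(cur) > best_len:
--             best_idx, best_len = k, len(cur)
--     # pass 2: reconstruct the longest intermediate by replaying that prefix
--     longest = string
--     for op in operators[:best_idx]: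
--         longest = _splice(longest, op)
--     return cur, longest
-- ===== Notes on version B (the rewrite author's own statement) =====
-- stated objective: alternative
-- what changed: B never stores the longest intermediate string: a first pass applies the ops tracking only the argmax INDEX of the state lengths, and a second pass replays exactly that prefix of operators on the original string to reconstruct the longest value, whereas A carries the longest string itself through its single loop.
import Mathlib
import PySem

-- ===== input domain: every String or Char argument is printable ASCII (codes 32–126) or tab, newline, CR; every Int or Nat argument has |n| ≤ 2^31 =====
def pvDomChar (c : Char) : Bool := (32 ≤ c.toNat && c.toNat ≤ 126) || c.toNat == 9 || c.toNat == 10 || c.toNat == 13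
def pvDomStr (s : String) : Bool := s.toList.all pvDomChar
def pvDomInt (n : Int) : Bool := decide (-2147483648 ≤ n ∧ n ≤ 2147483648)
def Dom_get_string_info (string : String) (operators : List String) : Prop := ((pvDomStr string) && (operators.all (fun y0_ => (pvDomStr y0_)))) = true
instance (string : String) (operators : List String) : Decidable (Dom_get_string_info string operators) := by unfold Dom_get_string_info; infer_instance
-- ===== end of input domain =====

-- B never stores the longest intermediate: pass 1 tracks only its index, pass 2 replays
-- that operator prefix to reconstruct it (objective: alternative algorithm, O(1) extra strings).

-- ===== PORT A =====
-- A's loop body; the state is (longest_str, longest_str_val, new_str)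
def pvStepA (st : Nat × List Char × List Char) (op : String) : Nat × List Char × List Char :=
  let op_slice := PySem.Chars.splitOn op.toList [';']
  let first_idx := (PySem.Int.ofChars? (op_slice.getD 0 [])).getD 0
  let sec_idx := (PySem.Int.ofChars? (op_slice.getD 1 [])).getD 0
  let op_str := op_slice.getD 2 []
  let new_str := PySem.List.slice st.2.2 none (some (min first_idx sec_idx)) ++ op_str ++
                 PySem.List.slice st.2.2 (some (max first_idx sec_idx + 1)) none
  if new_str.length > st.1 then (new_str.length, new_str, new_str)
  else (st.1, st.2.1, new_str)

def get_string_info (string : String) (operators : List String) : String × String :=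
  let res := operators.foldl pvStepA (string.toList.length, string.toList, string.toList)
  (String.ofList res.2.2, String.ofList res.2.1)

-- ===== PORT B =====
-- B's _splice helper (the getD defaults are reached only outside Pre_, where Python raises)
def pvSplice (s : List Char) (op : List Char) : List Char :=
  let parts := PySem.Chars.splitOn op [';']
  let i := (PySem.Int.ofChars? (parts.getD 0 [])).getD 0
  let j := (PySem.Int.ofChars? (parts.getD 1 [])).getD 0
  PySem.List.slice s none (some (min i j)) ++ parts.getD 2 [] ++
    PySem.List.slice s (some (max i j + 1)) none

-- B's pass-1 loop body; the state is (cur, best_idx, best_len, k)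
def pvStepB (st : List Char × Nat × Nat × Nat) (op : String) : List Char × Nat × Nat × Nat :=
  let k := st.2.2.2 + 1
  let cur := pvSplice st.1 op.toList
  if cur.length > st.2.2.1 then (cur, k, cur.length, k)
  else (cur, st.2.1, st.2.2.1, k)

def get_string_info_alt (string : String) (operators : List String) : String × String :=
  let p1 := operators.foldl pvStepB (string.toList, 0, string.toList.length, 0)
  let longest := (PySem.List.slice operators none (some ((p1.2.1 : Nat) : Int))).foldl
      (fun s op => pvSplice s op.toList) string.toList
  (String.ofList p1.1, String.ofList longest)

-- ===== PRECONDITION & SPEC =====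
-- Pre_ excludes exactly the operators on which Python A raises: an op whose ';'-split has
-- fewer than 3 parts (IndexError) or whose first two parts are not int()-parseable (ValueError).
def Pre_get_string_info (string : String) (operators : List String) : Prop :=
  ∀ op ∈ operators,
    3 ≤ (PySem.Chars.splitOn op.toList [';']).length ∧
    (PySem.Int.ofChars? ((PySem.Chars.splitOn op.toList [';']).getD 0 [])).isSome = true ∧
    (PySem.Int.ofChars? ((PySem.Chars.splitOn op.toList [';']).getD 1 [])).isSome = true
instance (string : String) (operators : List String) : Decidable (Pre_get_string_info string operators) := by unfold Pre_get_string_info; infer_instance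

def pvWitness_get_string_info : String × List String := ("hello", ["1;3;XY", "-2;0;z"])

def Spec_get_string_info (string : String) (operators : List String) (out : String × String) : Prop := out = get_string_info_alt string operators
instance (string : String) (operators : List String) (out : String × String) : Decidable (Spec_get_string_info string operators out) := by unfold Spec_get_string_info; infer_instance

-- ===== CLAIM =====
def Claim_equal_get_string_info : Prop := ∀ (string : String) (operators : List String), Dom_get_string_info string operators → Pre_get_string_info string operators → Spec_get_string_info string operators (get_string_info string operators)

-- ===== LEMMAS AND PROOFS =====

-- A's longest-update rule as a binary operation
def pvUpd (m x : List Char) : List Char := if m.length < x.length then x else m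

-- the last state, computed recursively
def pvLast (s : List Char) (ops : List String) : List Char :=
  match ops with
  | [] => s
  | op :: rest => pvLast (pvSplice s op.toList) rest

-- the running first-max over the states after s, seeded with v
def pvBest (v s : List Char) (ops : List String) : List Char :=
  match ops with
  | [] => v
  | op :: rest => pvBest (pvUpd v (pvSplice s op.toList)) (pvSplice s op.toList) rest

-- replaying a list of operators (B's pass 2, and the reference semantics)
def pvApply (s : List Char) (ops : List String) : List Char :=
  ops.foldl (fun t op => pvSplice t op.toList) s

lemma pvApply_append_singleton (s : List Char) (pre : List String) (op : String) :
    pvApply s (pre ++ [op]) = pvSplice (pvApply s pre) op.toList := by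
  simp [pvApply]

-- characterization of A's fold
set_option maxHeartbeats 2000000 in
lemma foldl_stepA (ops : List String) (s v : List Char) :
    ops.foldl pvStepA (v.length, v, s) = ((pvBest v s ops).length, pvBest v s ops, pvLast s ops) := by
  induction ops generalizing s v with
  | nil => rfl
  | cons op rest ih =>
      rw [List.foldl_cons]
      have hstep : pvStepA (v.length, v, s) op =
          (if v.length < (pvSplice s op.toList).length
            then ((pvSplice s op.toList).length, pvSplice s op.toList, pvSplice s op.toList)
            else (v.length, v, pvSplice s op.toList)) := by
        unfold pvStepA pvSplice
        rfl
      rw [hstep]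
      show _ = ((pvBest (pvUpd v (pvSplice s op.toList)) (pvSplice s op.toList) rest).length,
                pvBest (pvUpd v (pvSplice s op.toList)) (pvSplice s op.toList) rest,
                pvLast (pvSplice s op.toList) rest)
      by_cases h : v.length < (pvSplice s op.toList).length
      · rw [if_pos h]; rw [ih]; rw [pvUpd, if_pos h]
      · rw [if_neg h]; rw [ih]; rw [pvUpd, if_neg h]

-- characterization of B's pass 1: the final string, the best length, and an index bi'
-- whose prefix replay reconstructs exactly A's first-longest value
set_option maxHeartbeats 2000000 in
lemma foldl_stepB (ops : List String) : ∀ (s0 : List Char) (pre : List String) (bi : Nat),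
    bi ≤ pre.length →
    ∃ bi', (ops.foldl pvStepB
        (pvApply s0 pre, bi, (pvApply s0 (pre.take bi)).length, pre.length)
      = (pvLast (pvApply s0 pre) ops, bi',
         (pvBest (pvApply s0 (pre.take bi)) (pvApply s0 pre) ops).length, pre.length + ops.length))
    ∧ bi' ≤ (pre ++ ops).length
    ∧ pvApply s0 ((pre ++ ops).take bi') = pvBest (pvApply s0 (pre.take bi)) (pvApply s0 pre) ops := by
  induction ops with
  | nil =>
      intro s0 pre bi hbi
      exact ⟨bi, rfl, by simpa using hbi, by rw [List.append_nil]; rfl⟩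
  | cons op rest ih =>
      intro s0 pre bi hbi
      rw [List.foldl_cons]
      set cur := pvApply s0 pre with hcur
      set v := pvApply s0 (pre.take bi) with hv
      set n := pvSplice cur op.toList with hn
      have hnext : pvApply s0 (pre ++ [op]) = n := pvApply_append_singleton s0 pre op
      have hstep : pvStepB (cur, bi, v.length, pre.length) op =
          (if v.length < n.length then (n, pre.length + 1, n.length, pre.length + 1)
           else (n, bi, v.length, pre.length + 1)) := by
        unfold pvStepB
        simp only [hn]
      rw [hstep]
      have hl : pvLast cur (op :: rest) = pvLast n rest := by
        show pvLast (pvSplice cur op.toList) rest = _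
        rw [← hn]
      by_cases h : v.length < n.length
      · rw [if_pos h]
        have hb : pvBest v cur (op :: rest) = pvBest n n rest := by
          show pvBest (pvUpd v (pvSplice cur op.toList)) (pvSplice cur op.toList) rest = _
          rw [← hn, pvUpd, if_pos h]
        have htk : (pre ++ [op]).take (pre.length + 1) = pre ++ [op] := by simp
        obtain ⟨bi', h1, h2, h3⟩ := ih s0 (pre ++ [op]) (pre.length + 1) (by simp)
        have hvn : pvApply s0 ((pre ++ [op]).take (pre.length + 1)) = n := by rw [htk, hnext]
        rw [hvn, hnext] at h1 h3
        simp only [List.length_append, List.length_cons, List.length_nil, Nat.zero_add] at h1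
        refine ⟨bi', ?_, ?_, ?_⟩
        · rw [hb, hl, h1]
          simp only [Prod.mk.injEq, List.length_cons]
          exact ⟨trivial, trivial, trivial, by omega⟩
        · simp only [List.length_append, List.length_cons, List.length_nil] at h2 ⊢
          omega
        · rw [hb, show pre ++ op :: rest = (pre ++ [op]) ++ rest by simp]
          exact h3
      · rw [if_neg h]
        have hb : pvBest v cur (op :: rest) = pvBest v n rest := by
          show pvBest (pvUpd v (pvSplice cur op.toList)) (pvSplice cur op.toList) rest = _
          rw [← hn, pvUpd, if_neg h]
        have htk : (pre ++ [op]).take bi = pre.take bi :=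
          List.take_append_of_le_length hbi
        obtain ⟨bi', h1, h2, h3⟩ := ih s0 (pre ++ [op]) bi (by simp; omega)
        rw [htk, ← hv, hnext] at h1 h3
        simp only [List.length_append, List.length_cons, List.length_nil, Nat.zero_add] at h1
        refine ⟨bi', ?_, ?_, ?_⟩
        · rw [hb, hl, h1]
          simp only [Prod.mk.injEq, List.length_cons]
          exact ⟨trivial, trivial, trivial, by omega⟩
        · simp only [List.length_append, List.length_cons, List.length_nil] at h2 ⊢
          omega
        · rw [hb, show pre ++ op :: rest = (pre ++ [op]) ++ rest by simp]
          exact h3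

-- ===== VERDICT =====
theorem get_string_info_spec : Claim_equal_get_string_info := by
  intro string operators _ _
  unfold Spec_get_string_info
  show get_string_info string operators = get_string_info_alt string operators
  obtain ⟨bi', h1, h2, h3⟩ := foldl_stepB operators string.toList [] 0 (by simp)
  simp only [pvApply, List.foldl_nil, List.take_nil, List.nil_append, List.length_nil,
    Nat.zero_add] at h1 h2 h3
  simp only [get_string_info, get_string_info_alt]
  rw [foldl_stepA, h1]
  simp only
  rw [PySem.List.slice_to_natCast, h3]
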